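-- pv_equiv track=rewrite | github.com/tcb0/opcode-stats | src/stats.py | get_num_opcodes_per_block
-- ===== SOURCE A (Python) =====
-- from typing import Dict, Union, Tuple
--
-- def get_num_opcodes_per_block(tx_opcodes: Dict[int, Dict[str, Dict[str, int]]], start_block: Union[int, None] = None, end_block: Union[int, None] = None) -> Dict[int, int]:
--     """Return the number of unique opcodes (opcode count, not the quantities of each opcode) that appeared in a block.
--     The counts are obtained for all transactions in the tx_opcodes dict.
--     If start_block and end_block are specified,
--     then only the transactions in the [start_block, end_block) range are considered.
--     """
--
--     num_opcodes_per_block: Dict[int, int] = dict()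
--
--     filtered_opcodes = tx_opcodes
--
--     if start_block and end_block:
--         filtered_opcodes = filter_tx_opcodes(tx_opcodes, start_block, end_block)
--
--     for block_num, block_data in filtered_opcodes.items():
--         opcodes: Dict[str, int] = dict()
--
--         for tx_hash, tx_data in block_data.items():
--             for opcode, count in tx_data.items():
--                 if opcode not in opcodes:
--                     if block_num in num_opcodes_per_block:
--                         num_opcodes_per_block[block_num] += 1
--                     else:
--                         num_opcodes_per_block[block_num] = 1
--                     opcodes[opcode] = True
--
--     return num_opcodes_per_block
--
-- def filter_tx_opcodes(tx_opcodes: Dict[int, Dict[str, Dict[str, int]]], start_block: int, end_block: int) -> Dict[int, Dict[str, Dict[str, int]]]: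
--     filtered_opcodes = tx_opcodes
--
--     for block_num, block_data in tx_opcodes.items():
--         block_num_int = int(block_num)
--         if block_num_int >= start_block or block_num_int < end_block:
--             filtered_opcodes[block_num] = block_data
--
--     return filtered_opcodes
-- ===== SOURCE B (Python) =====
-- from typing import Dict, Union
--
-- def get_num_opcodes_per_block(tx_opcodes: Dict[int, Dict[str, Dict[str, int]]], start_block: Union[int, None] = None, end_block: Union[int, None] = None) -> Dict[int, int]:
--     """Number of unique opcodes per block, computed in two global phases:
--     flatten the whole structure into a stream of (block, opcode) pairs and
--     deduplicate that stream in order (dict.fromkeys), then tally how many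
--     deduplicated pairs each block contributed.  Blocks with no opcodes never
--     produce a pair and so are omitted.  A's block-range "filter" rewrites
--     existing keys of the same dict with the same values and never changes it,
--     so B drops it."""
--     pairs = dict.fromkeys(
--         (block_num, opcode)
--         for block_num, block_data in tx_opcodes.items()
--         for tx_data in block_data.values()
--         for opcode in tx_data)
--     counts: Dict[int, int] = {}
--     for block_num, _opcode in pairs:
--         counts[block_num] = counts.get(block_num, 0) + 1
--     return counts
-- ===== Notes on version B (the rewrite author's own statement) =====
-- stated objective: alternative
-- what changed: B replaces A's per-block seen-dict with incremental counter updates by two global staged passes: flatten the whole input into one stream of (block, opcode) pairs, deduplicate that stream in order with dict.fromkeys, then tally the deduplicated pairs per block; A's filter_tx_opcodes call is dropped because it only rewrites existing keys of the same dict with the same values and is provably a no-op.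
import Mathlib
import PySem

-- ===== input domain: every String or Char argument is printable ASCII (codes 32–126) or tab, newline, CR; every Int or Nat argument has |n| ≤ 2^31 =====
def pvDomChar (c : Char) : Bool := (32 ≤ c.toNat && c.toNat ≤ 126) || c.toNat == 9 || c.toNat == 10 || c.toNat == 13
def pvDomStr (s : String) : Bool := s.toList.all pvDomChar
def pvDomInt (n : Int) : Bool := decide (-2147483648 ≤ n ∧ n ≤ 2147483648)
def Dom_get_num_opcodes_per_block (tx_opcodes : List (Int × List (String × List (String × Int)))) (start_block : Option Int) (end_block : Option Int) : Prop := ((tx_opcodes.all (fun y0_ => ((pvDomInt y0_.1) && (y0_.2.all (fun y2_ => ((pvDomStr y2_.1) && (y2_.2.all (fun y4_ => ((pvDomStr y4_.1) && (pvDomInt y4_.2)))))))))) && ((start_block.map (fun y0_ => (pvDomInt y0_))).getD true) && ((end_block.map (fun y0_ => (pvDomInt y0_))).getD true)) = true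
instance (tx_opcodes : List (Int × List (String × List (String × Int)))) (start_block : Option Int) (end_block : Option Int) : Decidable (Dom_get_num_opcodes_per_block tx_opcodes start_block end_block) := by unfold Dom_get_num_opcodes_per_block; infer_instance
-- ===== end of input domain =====

-- B: two staged global passes — flatten everything to (block, opcode) pairs, dedup that stream, tally the pairs
-- per block — replacing A's per-block seen-dict with incremental counting and its no-op filter; objective: alternative.


-- ===== PORT A =====
def filter_tx_opcodes (tx_opcodes : List (Int × List (String × List (String × Int)))) (start_block end_block : Int) : List (Int × List (String × List (String × Int))) :=
  (tx_opcodes.foldl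
    (fun (acc : PySem.Dict Int (List (String × List (String × Int)))) p =>
      if p.1 ≥ start_block ∨ p.1 < end_block then acc.insert p.1 p.2 else acc)
    (PySem.Dict.mk tx_opcodes)).items

def get_num_opcodes_per_block (tx_opcodes : List (Int × List (String × List (String × Int)))) (start_block : Option Int) (end_block : Option Int) : List (Int × Int) :=
  let filtered : List (Int × List (String × List (String × Int))) :=
    match start_block, end_block with
    | some a, some b => if a ≠ 0 ∧ b ≠ 0 then filter_tx_opcodes tx_opcodes a b else tx_opcodes
    | _, _ => tx_opcodes
  (filtered.foldl
    (fun (num : PySem.Dict Int Int) bp =>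
      (bp.2.foldl
        (fun (st : PySem.Dict String Bool × PySem.Dict Int Int) tp =>
          tp.2.foldl
            (fun st op =>
              if st.1.contains op.1 then st
              else
                let num' := if st.2.contains bp.1
                  then st.2.insert bp.1 (st.2.getD bp.1 0 + 1)
                  else st.2.insert bp.1 1
                (st.1.insert op.1 true, num'))
            st)
        (PySem.Dict.empty, num)).2)
    PySem.Dict.empty).items

-- ===== PORT B =====
def get_num_opcodes_per_block_alt (tx_opcodes : List (Int × List (String × List (String × Int)))) (start_block : Option Int) (end_block : Option Int) : List (Int × Int) :=
  -- phase 1: flatten to a (block, opcode) pair stream, dedup in order (dict.fromkeys)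
  let pairs : List (Int × String) :=
    PySem.List.dedup (tx_opcodes.flatMap (fun bp => bp.2.flatMap (fun tp => tp.2.map (fun op => (bp.1, op.1)))))
  -- phase 2: tally the deduplicated pairs per block (counts[b] = counts.get(b, 0) + 1)
  (pairs.foldl (fun (counts : PySem.Dict Int Int) p => counts.insert p.1 (counts.getD p.1 0 + 1)) PySem.Dict.empty).items

-- ===== PRECONDITION & SPEC =====
-- Pre_ excludes association lists with duplicate block numbers: those cannot arise from A's Python
-- dict argument (Python collapses duplicate keys before A runs), so any list-level merge behaviour
-- on them is accidental.
def Pre_get_num_opcodes_per_block (tx_opcodes : List (Int × List (String × List (String × Int)))) (start_block : Option Int) (end_block : Option Int) : Prop :=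
  (tx_opcodes.map Prod.fst).Nodup
instance (tx_opcodes : List (Int × List (String × List (String × Int)))) (start_block : Option Int) (end_block : Option Int) : Decidable (Pre_get_num_opcodes_per_block tx_opcodes start_block end_block) := by unfold Pre_get_num_opcodes_per_block; infer_instance

def pvWitness_get_num_opcodes_per_block : (List (Int × List (String × List (String × Int)))) × Option Int × Option Int :=
  ([(1, [("t0", [("ADD", 2), ("MUL", 1)]), ("t1", [("ADD", 1)])]), (2, [])], some 1, some 3)

def Spec_get_num_opcodes_per_block (tx_opcodes : List (Int × List (String × List (String × Int)))) (start_block : Option Int) (end_block : Option Int) (out : List (Int × Int)) : Prop := out = get_num_opcodes_per_block_alt tx_opcodes start_block end_block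
instance (tx_opcodes : List (Int × List (String × List (String × Int)))) (start_block : Option Int) (end_block : Option Int) (out : List (Int × Int)) : Decidable (Spec_get_num_opcodes_per_block tx_opcodes start_block end_block out) := by unfold Spec_get_num_opcodes_per_block; infer_instance

-- ===== CLAIM (what is proved, stated in full; the proofs are below) =====
def Claim_equal_get_num_opcodes_per_block : Prop := ∀ (tx_opcodes : List (Int × List (String × List (String × Int)))) (start_block : Option Int) (end_block : Option Int), Dom_get_num_opcodes_per_block tx_opcodes start_block end_block → Pre_get_num_opcodes_per_block tx_opcodes start_block end_block → Spec_get_num_opcodes_per_block tx_opcodes start_block end_block (get_num_opcodes_per_block tx_opcodes start_block end_block)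

-- ===== LEMMAS AND PROOFS =====

-- the flattened opcode-key stream of one block (duplicates kept)
def pvFlat (bd : List (String × List (String × Int))) : List String :=
  bd.flatMap (fun tp => tp.2.map Prod.fst)

-- the deduplicated pair segment one block contributes
def pvSeg (bp : Int × List (String × List (String × Int))) : List (Int × String) :=
  (PySem.Set.ofList (pvFlat bp.2)).map (fun op => (bp.1, op))

-- the common normal form both results are reduced to
def pvRows (l : List (Int × List (String × List (String × Int)))) : List (Int × Int) :=
  (l.filter (fun bp => !(PySem.Set.ofList (pvFlat bp.2)).isEmpty)).map
    (fun bp => (bp.1, ((PySem.Set.ofList (pvFlat bp.2)).length : Int)))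

-- generic flatten of a nested fold
theorem pv_foldl_flat {α β γ : Type} (g : γ → α → γ) (h : β → List α) (l : List β) (init : γ) :
    l.foldl (fun acc tp => (h tp).foldl g acc) init = (l.flatMap h).foldl g init := by
  induction l generalizing init with
  | nil => rfl
  | cons p l ih => simp [List.foldl_append, ih]

def pvDictOf (S : List String) : PySem.Dict String Bool := PySem.Dict.mk (S.map (fun o => (o, true)))

theorem pv_contains_dictOf (S : List String) (op : String) :
    (pvDictOf S).contains op = true ↔ op ∈ S := by
  rw [PySem.Dict.contains_iff_mem_keys]
  show op ∈ (S.map (fun o => (o, true))).map Prod.fst ↔ _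
  simp

theorem pv_dictOf_insert (S : List String) (op : String) (h : op ∉ S) :
    (pvDictOf S).insert op true = pvDictOf (S ++ [op]) := by
  apply PySem.Dict.ext
  rw [PySem.Dict.items_insert_of_not_contains]
  · simp [pvDictOf]
  · rw [Bool.eq_false_iff]; intro hc; exact h ((pv_contains_dictOf S op).1 hc)

theorem pv_A_inner (b : Int) (L : List String) :
    ∀ (S : PySem.Set String) (num0 : PySem.Dict Int Int), S.Nodup → num0.contains b = false →
    L.foldl (fun st op =>
        if st.1.contains op then st
        else
          ((st.1.insert op true : PySem.Dict String Bool),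
           if st.2.contains b then st.2.insert b (st.2.getD b 0 + 1) else st.2.insert b 1))
      (pvDictOf S, if S.isEmpty then num0 else num0.insert b (S.length : Int))
    = (pvDictOf (PySem.Set.update S L),
       if (PySem.Set.update S L).isEmpty then num0
       else num0.insert b (((PySem.Set.update S L).length : Nat) : Int)) := by
  induction L with
  | nil => intro S num0 _ _; simp [PySem.Set.update]
  | cons op L ih =>
    intro S num0 hS hb
    rw [List.foldl_cons, PySem.Set.update_cons]
    by_cases hmem : op ∈ S
    · rw [if_pos ((pv_contains_dictOf S op).2 hmem), PySem.Set.add_of_mem hmem]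
      exact ih S num0 hS hb
    · have hc : (pvDictOf S).contains op = false := by
        rw [Bool.eq_false_iff]; intro h; exact hmem ((pv_contains_dictOf S op).1 h)
      rw [if_neg (by simp [hc])]
      have hadd : PySem.Set.add S op = S ++ [op] := PySem.Set.add_of_not_mem hmem
      have hstate :
          ((pvDictOf S).insert op true,
            if (if S.isEmpty then num0 else num0.insert b (S.length : Int)).contains b
            then (if S.isEmpty then num0 else num0.insert b (S.length : Int)).insert b
                  ((if S.isEmpty then num0 else num0.insert b (S.length : Int)).getD b 0 + 1)
            else (if S.isEmpty then num0 else num0.insert b (S.length : Int)).insert b 1)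
          = (pvDictOf (PySem.Set.add S op),
             if (PySem.Set.add S op).isEmpty then num0
             else num0.insert b (((PySem.Set.add S op).length : Nat) : Int)) := by
        rw [hadd, pv_dictOf_insert S op hmem]
        cases S with
        | nil => simp [hb]
        | cons x S' =>
          have h1 : (x :: S' : List String).isEmpty = false := rfl
          have h2 : ((x :: S') ++ [op] : List String).isEmpty = false := rfl
          rw [h1, h2]
          simp only [Bool.false_eq_true, if_false]
          rw [if_pos (PySem.Dict.contains_insert_self _ _ _), PySem.Dict.getD_insert_self,
              PySem.Dict.insert_insert_self]
          have h3 : (((x :: S').length : Int) + 1) = (((x :: S') ++ [op] : List String).length : Int) := by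
            simp [List.length_append]
          rw [h3]
      rw [hstate]
      have := ih (PySem.Set.add S op) num0 (PySem.Set.nodup_add S op hS) hb
      rw [hadd] at this ⊢
      simpa using this

-- per-block step of A equals "skip if no opcodes, else insert the set size"
theorem pv_step (b : Int) (bd : List (String × List (String × Int))) (num : PySem.Dict Int Int)
    (hb : num.contains b = false) :
    (bd.foldl
        (fun (st : PySem.Dict String Bool × PySem.Dict Int Int) tp =>
          tp.2.foldl
            (fun st op =>
              if st.1.contains op.1 then st
              else
                (st.1.insert op.1 true,
                 if st.2.contains b then st.2.insert b (st.2.getD b 0 + 1) else st.2.insert b 1))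
            st)
        (PySem.Dict.empty, num)).2
    = (if (PySem.Set.ofList (pvFlat bd)).isEmpty then num
       else num.insert b ((PySem.Set.ofList (pvFlat bd)).length : Int)) := by
  have h1 : ∀ (tp : String × List (String × Int)) (st : PySem.Dict String Bool × PySem.Dict Int Int),
      tp.2.foldl
        (fun st op =>
          if st.1.contains op.1 then st
          else
            (st.1.insert op.1 true,
             if st.2.contains b then st.2.insert b (st.2.getD b 0 + 1) else st.2.insert b 1))
        st
      = (tp.2.map Prod.fst).foldl
        (fun st op =>
          if st.1.contains op then st
          else
            (st.1.insert op true,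
             if st.2.contains b then st.2.insert b (st.2.getD b 0 + 1) else st.2.insert b 1))
        st := by
    intro tp st; rw [List.foldl_map]
  rw [funext (fun st => funext (fun tp => h1 tp st)), pv_foldl_flat]
  have h0 : ((PySem.Dict.empty : PySem.Dict String Bool), num)
      = (pvDictOf ([] : List String), if ([] : List String).isEmpty then num else num.insert b (([] : List String).length : Int)) := by
    simp [pvDictOf, PySem.Dict.empty]
  rw [h0, pv_A_inner b (List.flatMap (fun tp => List.map Prod.fst tp.2) bd) [] num List.nodup_nil hb]
  rw [PySem.Set.update_nil_left]
  rfl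

-- A's whole fold, reduced to the normal form
theorem pv_A_items (l : List (Int × List (String × List (String × Int)))) :
    ∀ (d : PySem.Dict Int Int), (∀ b ∈ l.map Prod.fst, d.contains b = false) →
      (l.map Prod.fst).Nodup → d.keys.Nodup →
    (l.foldl
      (fun (num : PySem.Dict Int Int) bp =>
        (bp.2.foldl
          (fun (st : PySem.Dict String Bool × PySem.Dict Int Int) tp =>
            tp.2.foldl
              (fun st op =>
                if st.1.contains op.1 then st
                else
                  (st.1.insert op.1 true,
                   if st.2.contains bp.1 then st.2.insert bp.1 (st.2.getD bp.1 0 + 1)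
                   else st.2.insert bp.1 1))
              st)
          (PySem.Dict.empty, num)).2)
      d).items
    = d.items ++ pvRows l := by
  induction l with
  | nil => intro d _ _ _; simp [pvRows]
  | cons bp l ih =>
    intro d hd hnd hk
    rw [List.foldl_cons]
    have hb : d.contains bp.1 = false := hd bp.1 (by simp)
    rw [pv_step bp.1 bp.2 d hb]
    simp only [List.map_cons, List.nodup_cons] at hnd
    by_cases he : (PySem.Set.ofList (pvFlat bp.2)).isEmpty = true
    · rw [if_pos he, ih d (fun b h => hd b (List.mem_cons_of_mem _ h)) hnd.2 hk]
      simp [pvRows, he]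
    · rw [if_neg he]
      have hfresh : ∀ b ∈ l.map Prod.fst,
          (d.insert bp.1 ((PySem.Set.ofList (pvFlat bp.2)).length : Int)).contains b = false := by
        intro b hbm
        rw [PySem.Dict.contains_insert]
        have : b ≠ bp.1 := fun h => hnd.1 (h ▸ hbm)
        simp [this, hd b (List.mem_cons_of_mem _ hbm)]
      rw [ih _ hfresh hnd.2 (PySem.Dict.nodup_keys_insert d _ _ hk),
          PySem.Dict.items_insert_of_not_contains d _ hb]
      simp [pvRows, he]

-- ----- B-side lemmas -----

theorem pv_ofList_map_inj {α β : Type} [BEq α] [LawfulBEq α] [BEq β] [LawfulBEq β] (f : α → β)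
    (hf : Function.Injective f) (l : List α) :
    PySem.Set.ofList (l.map f) = (PySem.Set.ofList l).map f := by
  have key : ∀ (l : List α) (S : PySem.Set α),
      (l.map f).foldl PySem.Set.add (S.map f) = (l.foldl PySem.Set.add S).map f := by
    intro l
    induction l with
    | nil => intro S; rfl
    | cons x l ih =>
      intro S
      rw [List.map_cons, List.foldl_cons, List.foldl_cons]
      have hadd : PySem.Set.add (S.map f) (f x) = (PySem.Set.add S x).map f := by
        by_cases hm : x ∈ S
        · rw [PySem.Set.add_of_mem hm, PySem.Set.add_of_mem (List.mem_map_of_mem hm)]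
        · have hm' : f x ∉ S.map f := by
            intro h
            obtain ⟨y, hy, hxy⟩ := List.mem_map.1 h
            exact hm (hf hxy ▸ hy)
          rw [PySem.Set.add_of_not_mem hm, PySem.Set.add_of_not_mem hm', List.map_append]
          rfl
      rw [hadd, ih]
  have := key l []
  simpa [PySem.Set.ofList_eq_foldl] using this

-- updating past a disjoint prefix leaves the prefix alone
theorem pv_update_append_disjoint {α : Type} [BEq α] [LawfulBEq α] (ys : List α) :
    ∀ (S T : List α), (∀ x ∈ ys, x ∉ S) →
      PySem.Set.update (S ++ T) ys = S ++ PySem.Set.update T ys := by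
  induction ys with
  | nil => intro S T _; simp [PySem.Set.update]
  | cons y ys ih =>
    intro S T h
    rw [PySem.Set.update_cons, PySem.Set.update_cons]
    have hyS : y ∉ S := h y (by simp)
    have hadd : PySem.Set.add (S ++ T) y = S ++ PySem.Set.add T y := by
      by_cases hm : y ∈ T
      · rw [PySem.Set.add_of_mem (List.mem_append.2 (Or.inr hm)), PySem.Set.add_of_mem hm]
      · have : y ∉ S ++ T := by
          intro hc; rcases List.mem_append.1 hc with hc | hc
          · exact hyS hc
          · exact hm hc
        rw [PySem.Set.add_of_not_mem this, PySem.Set.add_of_not_mem hm, List.append_assoc]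
    rw [hadd]
    exact ih S (PySem.Set.add T y) (fun x hx => h x (List.mem_cons_of_mem _ hx))

theorem pv_ofList_append {α : Type} [BEq α] (xs ys : List α) :
    PySem.Set.ofList (xs ++ ys) = PySem.Set.update (PySem.Set.ofList xs) ys := by
  simp [PySem.Set.ofList_eq_foldl, PySem.Set.update, List.foldl_append]

-- deduplicating the global pair stream = concatenating the per-block deduplicated segments
theorem pv_pairs_flat (l : List (Int × List (String × List (String × Int))))
    (hnd : (l.map Prod.fst).Nodup) :
    PySem.Set.ofList (l.flatMap (fun bp => bp.2.flatMap (fun tp => tp.2.map (fun op => (bp.1, op.1)))))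
      = l.flatMap pvSeg := by
  induction l with
  | nil => rfl
  | cons bp l ih =>
    simp only [List.map_cons, List.nodup_cons] at hnd
    rw [List.flatMap_cons, pv_ofList_append]
    have hraw : (bp.2.flatMap (fun tp => tp.2.map (fun op => (bp.1, op.1))))
        = (pvFlat bp.2).map (fun op => (bp.1, op)) := by
      simp [pvFlat, List.map_flatMap, List.map_map, Function.comp_def]
    have hinj : Function.Injective (fun op : String => (bp.1, op)) := by
      intro a b h; simpa using h
    have hseg : PySem.Set.ofList (bp.2.flatMap (fun tp => tp.2.map (fun op => (bp.1, op.1))))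
        = pvSeg bp := by
      rw [hraw, pv_ofList_map_inj _ hinj]; rfl
    rw [hseg]
    have hdisj : ∀ x ∈ l.flatMap (fun bp => bp.2.flatMap (fun tp => tp.2.map (fun op => (bp.1, op.1)))),
        x ∉ pvSeg bp := by
      intro x hx hxseg
      have hx1 : x.1 ∈ l.map Prod.fst := by
        obtain ⟨cp, hcp, hxin⟩ := List.mem_flatMap.1 hx
        obtain ⟨tp, _, hxin2⟩ := List.mem_flatMap.1 hxin
        obtain ⟨op, _, hxeq⟩ := List.mem_map.1 hxin2
        have : x.1 = cp.1 := by rw [← hxeq]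
        exact this ▸ List.mem_map_of_mem hcp
      have hx2 : x.1 = bp.1 := by
        obtain ⟨op, _, hxeq⟩ := List.mem_map.1 hxseg
        rw [← hxeq]
      exact hnd.1 (hx2 ▸ hx1)
    have := pv_update_append_disjoint
      (l.flatMap (fun bp => bp.2.flatMap (fun tp => tp.2.map (fun op => (bp.1, op.1)))))
      (pvSeg bp) [] hdisj
    simp only [List.append_nil] at this
    rw [this, PySem.Set.update_nil_left, ih hnd.2, List.flatMap_cons]

-- the counting fold over one block's segment
theorem pv_count_seg (b : Int) (seg : List (Int × String)) :
    ∀ (d : PySem.Dict Int Int), (∀ p ∈ seg, p.1 = b) →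
    seg.foldl (fun (counts : PySem.Dict Int Int) p => counts.insert p.1 (counts.getD p.1 0 + 1)) d
      = if seg.isEmpty then d else d.insert b (d.getD b 0 + (seg.length : Int)) := by
  induction seg with
  | nil => intro d _; rfl
  | cons p seg ih =>
    intro d h
    have hp : p.1 = b := h p (by simp)
    rw [List.foldl_cons, hp, ih _ (fun q hq => h q (List.mem_cons_of_mem _ hq))]
    by_cases he : seg.isEmpty = true
    · have : seg = [] := List.isEmpty_iff.1 he
      subst this; simp
    · rw [if_neg he]
      have h1 : (p :: seg).isEmpty = false := rfl
      rw [h1]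
      simp only [Bool.false_eq_true, if_false,
        PySem.Dict.getD_insert_self, PySem.Dict.insert_insert_self, List.length_cons]
      congr 1
      push_cast
      ring

-- the counting fold over the whole concatenated pair stream, reduced to the normal form
theorem pv_count_items (l : List (Int × List (String × List (String × Int)))) :
    ∀ (d : PySem.Dict Int Int), (∀ b ∈ l.map Prod.fst, d.contains b = false) →
      (l.map Prod.fst).Nodup → d.keys.Nodup →
    ((l.flatMap pvSeg).foldl
        (fun (counts : PySem.Dict Int Int) p => counts.insert p.1 (counts.getD p.1 0 + 1)) d).items
      = d.items ++ pvRows l := by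
  induction l with
  | nil => intro d _ _ _; simp [pvRows]
  | cons bp l ih =>
    intro d hd hnd hk
    simp only [List.map_cons, List.nodup_cons] at hnd
    rw [List.flatMap_cons, List.foldl_append,
        pv_count_seg bp.1 (pvSeg bp) d (by intro p hp; obtain ⟨op, _, hpe⟩ := List.mem_map.1 hp; rw [← hpe])]
    have hb : d.contains bp.1 = false := hd bp.1 (by simp)
    have hlen : (pvSeg bp).length = (PySem.Set.ofList (pvFlat bp.2)).length := by
      simp [pvSeg]
    by_cases he : (PySem.Set.ofList (pvFlat bp.2)).isEmpty = true
    · have hsege : (pvSeg bp).isEmpty = true := by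
        simp only [pvSeg]
        rw [List.isEmpty_iff] at he ⊢
        simp [he]
      rw [if_pos hsege, ih d (fun b h => hd b (List.mem_cons_of_mem _ h)) hnd.2 hk]
      simp [pvRows, he]
    · have hsege : (pvSeg bp).isEmpty = false := by
        rw [Bool.eq_false_iff]
        intro hcontr
        rw [List.isEmpty_iff] at hcontr
        exact he (by rw [List.isEmpty_iff]; simpa [pvSeg, List.map_eq_nil_iff] using hcontr)
      rw [hsege]
      simp only [Bool.false_eq_true, if_false]
      rw [PySem.Dict.getD_of_not_contains d 0 hb, hlen]
      have hfresh : ∀ b ∈ l.map Prod.fst,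
          (d.insert bp.1 (0 + ((PySem.Set.ofList (pvFlat bp.2)).length : Int))).contains b = false := by
        intro b hbm
        rw [PySem.Dict.contains_insert]
        have : b ≠ bp.1 := fun h => hnd.1 (h ▸ hbm)
        simp [this, hd b (List.mem_cons_of_mem _ hbm)]
      rw [ih _ hfresh hnd.2 (PySem.Dict.nodup_keys_insert d _ _ hk),
          PySem.Dict.items_insert_of_not_contains d _ hb]
      simp [pvRows, he]

-- ----- filter_tx_opcodes is a no-op on nodup keys -----

theorem pv_insert_mem_self {ν : Type} (d : PySem.Dict Int ν) (hnd : d.keys.Nodup)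
    (k : Int) (v : ν) (hm : (k, v) ∈ d.items) : d.insert k v = d := by
  have hc : d.contains k = true := by
    rw [PySem.Dict.contains_iff_mem_keys]
    exact PySem.Dict.mem_keys_of_mem_items d hm
  apply PySem.Dict.ext
  rw [PySem.Dict.items_insert_of_contains d v hc]
  conv_rhs => rw [← List.map_id d.items]
  apply List.map_congr_left
  intro q hq
  by_cases hqk : q.1 = k
  · have h1 : d.get? k = some v := PySem.Dict.get?_of_mem_items d hm hnd
    have h2 : d.get? q.1 = some q.2 := PySem.Dict.get?_of_mem_items d (by simpa using hq) hnd
    rw [hqk, h1] at h2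
    simp only [hqk, beq_self_eq_true, if_true, id]
    obtain ⟨q1, q2⟩ := q
    simp_all
  · simp [hqk]

theorem pv_filter_aux (tx : List (Int × List (String × List (String × Int))))
    (hnd : (tx.map Prod.fst).Nodup) (s e : Int) :
    ∀ (l : List (Int × List (String × List (String × Int)))), (∀ p ∈ l, p ∈ tx) →
      l.foldl
        (fun (acc : PySem.Dict Int (List (String × List (String × Int)))) p =>
          if p.1 ≥ s ∨ p.1 < e then acc.insert p.1 p.2 else acc)
        (PySem.Dict.mk tx) = PySem.Dict.mk tx := by
  intro l
  induction l with
  | nil => intro _; rfl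
  | cons p l ih =>
    intro h
    rw [List.foldl_cons]
    have hstep : (if p.1 ≥ s ∨ p.1 < e then (PySem.Dict.mk tx).insert p.1 p.2 else PySem.Dict.mk tx)
        = PySem.Dict.mk tx := by
      split
      · exact pv_insert_mem_self (PySem.Dict.mk tx) hnd p.1 p.2
          (by simpa using h p (List.mem_cons_self))
      · rfl
    rw [hstep]
    exact ih (fun q hq => h q (List.mem_cons_of_mem _ hq))

theorem pv_filter_id (tx : List (Int × List (String × List (String × Int))))
    (h : (tx.map Prod.fst).Nodup) (s e : Int) : filter_tx_opcodes tx s e = tx := by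
  unfold filter_tx_opcodes
  rw [pv_filter_aux tx h s e tx (fun p hp => hp)]

-- ----- main equality -----

theorem pv_main (tx : List (Int × List (String × List (String × Int))))
    (h : (tx.map Prod.fst).Nodup)
    (s e : Option Int) :
    get_num_opcodes_per_block tx s e = get_num_opcodes_per_block_alt tx s e := by
  unfold get_num_opcodes_per_block get_num_opcodes_per_block_alt
  have hfiltered :
      (match s, e with
        | some a, some b => if a ≠ 0 ∧ b ≠ 0 then filter_tx_opcodes tx a b else tx
        | _, _ => tx) = tx := by
    match s, e with
    | some a, some b =>
      by_cases hab : a ≠ 0 ∧ b ≠ 0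
      · simp only [if_pos hab]; exact pv_filter_id tx h a b
      · simp only [if_neg hab]
    | some _, none => rfl
    | none, some _ => rfl
    | none, none => rfl
  simp only [hfiltered, PySem.List.dedup_eq_ofList]
  rw [pv_pairs_flat tx h]
  rw [pv_A_items tx PySem.Dict.empty (fun b _ => PySem.Dict.contains_empty b) h
        PySem.Dict.nodup_keys_empty,
      pv_count_items tx PySem.Dict.empty (fun b _ => PySem.Dict.contains_empty b) h
        PySem.Dict.nodup_keys_empty]

-- ===== VERDICT (by name: the statement is the Claim_ definition above) =====
theorem get_num_opcodes_per_block_spec : Claim_equal_get_num_opcodes_per_block := by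
  intro tx s e _ hpre
  exact pv_main tx hpre s e
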